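-- pv_equiv track=rewrite | github.com/petru-robu/advent-of-code | 2024/day13/main.py | nmbs
-- ===== SOURCE A (Python) =====
-- def nmbs(s):
--     numbers = []
--     current_number = ""
--
--     for char in s:
--         if char.isdigit():
--             current_number += char
--         elif current_number:
--             numbers.append(int(current_number))
--             current_number = ""
--             if len(numbers) == 2:
--                 break
--
--     if current_number and len(numbers) < 2:
--         numbers.append(int(current_number))
--
--     return numbers
-- ===== SOURCE B (Python) =====
-- def nmbs(s):
--     out = []
--     i, n = 0, len(s)
--     while i < n and len(out) < 2:
--         if s[i].isdigit():
--             j = i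
--             while j < n and s[j].isdigit():
--                 j += 1
--             out.append(int(s[i:j]))
--             i = j
--         else:
--             i += 1
--     return out
-- ===== Notes on version B (the rewrite author's own statement) =====
-- stated objective: alternative
-- what changed: Replaces A's char-by-char scan with a string accumulator, mid-loop break and post-loop flush by an index-jump scan that finds each maximal digit run in one inner advance and slices-and-converts it, with the two-number cap in the loop condition; no buffer and no trailing-flush branch.
import Mathlib
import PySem

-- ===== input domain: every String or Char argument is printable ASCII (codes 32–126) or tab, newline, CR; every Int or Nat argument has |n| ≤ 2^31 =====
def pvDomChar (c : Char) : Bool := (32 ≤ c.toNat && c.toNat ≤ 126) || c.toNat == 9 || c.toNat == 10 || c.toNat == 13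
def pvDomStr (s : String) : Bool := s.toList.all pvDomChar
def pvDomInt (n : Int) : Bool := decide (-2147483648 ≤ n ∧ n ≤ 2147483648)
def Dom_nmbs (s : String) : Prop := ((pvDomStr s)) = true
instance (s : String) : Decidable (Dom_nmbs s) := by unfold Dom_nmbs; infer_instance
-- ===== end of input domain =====

-- B replaces A's char-buffer/flush/break scan by an index-jump scan over maximal digit runs
-- (inner while = takeWhile/dropWhile); same O(n) cost, no buffer and no post-loop flush (objective: alternative).

-- int(digits) on a nonempty all-digit string (Python's int conversion, used by both programs)
def pvVal (cs : List Char) : Int := cs.foldl (fun a c => 10 * a + ((c.toNat : Int) - 48)) 0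

-- ===== PORT A =====
-- the 'for char in s' loop: state = (numbers, current_number); after the loop the trailing flush
def nmbsLoop : List Char → List Int → List Char → List Int
  | [], nums, cur => if cur ≠ [] ∧ nums.length < 2 then nums ++ [pvVal cur] else nums
  | c :: cs, nums, cur =>
    if PySem.Chars.isdigit c then nmbsLoop cs nums (cur ++ [c])
    else if cur ≠ [] then
      -- append int(current_number); break when len(numbers) == 2 (then cur = "" so no flush)
      if (nums ++ [pvVal cur]).length = 2 then nums ++ [pvVal cur]
      else nmbsLoop cs (nums ++ [pvVal cur]) []
    else nmbsLoop cs nums cur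

def nmbs (s : String) : List Int := nmbsLoop s.toList [] []

-- ===== PORT B =====
-- outer while with len(out) < 2 as fuel k; inner while j advance = takeWhile, i = j jump = dropWhile
def nmbsScan : List Char → Nat → List Int
  | _, 0 => []
  | [], _ + 1 => []
  | c :: cs, k + 1 =>
    if PySem.Chars.isdigit c then
      pvVal (c :: cs.takeWhile PySem.Chars.isdigit) :: nmbsScan (cs.dropWhile PySem.Chars.isdigit) k
    else nmbsScan cs (k + 1)
  termination_by l _ => l.length
  decreasing_by
  · exact Nat.lt_succ_of_le (List.length_dropWhile_le _ _)
  · exact Nat.lt_succ_self _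

def nmbs_alt (s : String) : List Int := nmbsScan s.toList 2

-- ===== PRECONDITION & SPEC =====
def Spec_nmbs (s : String) (out : List Int) : Prop := out = nmbs_alt s
instance (s : String) (out : List Int) : Decidable (Spec_nmbs s out) := by unfold Spec_nmbs; infer_instance

-- ===== CLAIM (what is proved, stated in full; the proofs are below) =====
def Claim_equal_nmbs : Prop := ∀ (s : String), Dom_nmbs s → Spec_nmbs s (nmbs s)

-- ===== LEMMAS AND PROOFS =====

-- spec-side: the maximal digit runs of a string, in B's shape
def pvRuns : List Char → List (List Char)
  | [] => []
  | c :: cs =>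
    if PySem.Chars.isdigit c then
      (c :: cs.takeWhile PySem.Chars.isdigit) :: pvRuns (cs.dropWhile PySem.Chars.isdigit)
    else pvRuns cs
  termination_by l => l.length
  decreasing_by
  · exact Nat.lt_succ_of_le (List.length_dropWhile_le _ _)
  · exact Nat.lt_succ_self _

-- spec-side: the digit runs in A's shape (buffer-passing)
def pvRunsAux : List Char → List Char → List (List Char)
  | cur, [] => if cur = [] then [] else [cur]
  | cur, c :: cs =>
    if PySem.Chars.isdigit c then pvRunsAux (cur ++ [c]) cs
    else if cur = [] then pvRunsAux [] cs
    else cur :: pvRunsAux [] cs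

theorem nmbsScan_eq_runs (l : List Char) (k : Nat) :
    nmbsScan l k = ((pvRuns l).take k).map pvVal := by
  induction l, k using nmbsScan.induct with
  | case1 l => simp [nmbsScan, List.take_zero]
  | case2 k => simp [nmbsScan, pvRuns]
  | case3 c cs k h ih => simp [nmbsScan, pvRuns, h, ih]
  | case4 c cs k h ih => simp [nmbsScan, pvRuns, h, ih]

theorem runsAux_eq (l : List Char) :
    pvRunsAux [] l = pvRuns l ∧
    ∀ cur : List Char, cur ≠ [] →
      pvRunsAux cur l =
        (cur ++ l.takeWhile PySem.Chars.isdigit) :: pvRuns (l.dropWhile PySem.Chars.isdigit) := by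
  induction l with
  | nil =>
    constructor
    · simp [pvRunsAux, pvRuns]
    · intro cur h; simp [pvRunsAux, pvRuns, h]
  | cons c cs ih =>
    by_cases hc : PySem.Chars.isdigit c = true
    · constructor
      · rw [pvRunsAux, pvRuns]
        simp only [hc, if_true, List.nil_append]
        rw [show ([c] : List Char) = [] ++ [c] from rfl] at *
        rw [ih.2 ([] ++ [c]) (by simp)]
        simp
      · intro cur hcur
        rw [pvRunsAux]
        simp only [hc, if_true]
        rw [ih.2 (cur ++ [c]) (by simp)]
        simp [hc]
    · constructor
      · rw [pvRunsAux, pvRuns]; simp [hc, ih.1]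
      · intro cur hcur
        rw [pvRunsAux, if_neg hc, if_neg hcur, ih.1,
          show (c :: cs).dropWhile PySem.Chars.isdigit = c :: cs from by simp [hc],
          show (c :: cs).takeWhile PySem.Chars.isdigit = [] from by simp [hc]]
        conv_rhs => rw [pvRuns]
        simp [hc]

theorem nmbsLoop_eq (l : List Char) :
    ∀ (nums : List Int) (cur : List Char), nums.length ≤ 1 →
      nmbsLoop l nums cur = (nums ++ (pvRunsAux cur l).map pvVal).take 2 := by
  induction l with
  | nil =>
    intro nums cur h
    rcases Decidable.em (cur = []) with hc | hc
    · rw [nmbsLoop]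
      simp [pvRunsAux, hc, List.take_of_length_le (show nums.length ≤ 2 by omega)]
    · rw [nmbsLoop, if_pos ⟨hc, show nums.length < 2 by omega⟩, pvRunsAux, if_neg hc]
      rw [List.take_of_length_le (show (nums ++ (([cur] : List (List Char)).map pvVal)).length ≤ 2 by
        simp only [List.map_cons, List.map_nil, List.length_append, List.length_cons,
          List.length_nil]
        omega)]
      simp
  | cons c cs ih =>
    intro nums cur h
    by_cases hc : PySem.Chars.isdigit c = true
    · rw [nmbsLoop, pvRunsAux, if_pos hc, if_pos hc]; exact ih nums (cur ++ [c]) h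
    · rcases Decidable.em (cur = []) with hcur | hcur
      · rw [nmbsLoop, pvRunsAux, if_neg hc, if_neg hc, if_pos hcur]
        rw [if_neg (show ¬ cur ≠ [] from not_not_intro hcur), hcur]
        exact ih nums [] h
      · rw [nmbsLoop, pvRunsAux, if_neg hc, if_neg hc, if_pos hcur, if_neg hcur]
        by_cases h2 : (nums ++ [pvVal cur]).length = 2
        · rw [if_pos h2, List.map_cons,
            show nums ++ pvVal cur :: (pvRunsAux [] cs).map pvVal
              = (nums ++ [pvVal cur]) ++ (pvRunsAux [] cs).map pvVal from by simp,
            List.take_append_of_le_length (le_of_eq h2.symm),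
            List.take_of_length_le (le_of_eq h2)]
        · rw [if_neg h2]
          have h1 : (nums ++ [pvVal cur]).length ≤ 1 := by
            rw [List.length_append, List.length_cons, List.length_nil] at h2 ⊢
            omega
          rw [ih (nums ++ [pvVal cur]) [] h1]
          simp

-- ===== VERDICT (by name: the statement is the Claim_ definition above) =====
theorem nmbs_spec : Claim_equal_nmbs := by
  intro s _
  show nmbs s = nmbs_alt s
  rw [nmbs, nmbs_alt, nmbsLoop_eq _ [] [] (by simp), nmbsScan_eq_runs, (runsAux_eq _).1]
  simp [List.map_take]
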